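-- pv_equiv track=rewrite | github.com/namdoel1412/ltpython | tichchuso_tongchuso.py | tich_tong
-- ===== SOURCE A (Python) =====
-- def tich_tong(inp):
--     length = len(inp)
--     lst = []
--     lst.append(1)
--     lst.append(0)
--     flag = True
--     for i in range(0, length):
--         if i%2 == 0:
--             if(inp[i] != '0'):
--                 lst[0] *= int(inp[i])
--                 flag = False
--         else:
--             lst[1] += int(inp[i])
--     if flag:
--         lst[0] = 0
--     return lst
-- ===== SOURCE B (Python) =====
-- def tich_tong(inp):
--     evens = [int(c) for c in inp[0::2] if c != '0']
--     odds = [int(c) for c in inp[1::2]]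
--     p = 1
--     for d in evens:
--         p *= d
--     return [p if evens else 0, sum(odds)]
-- ===== Notes on version B (the rewrite author's own statement) =====
-- stated objective: simpler
-- what changed: Replaces the single index loop with parity tests by slicing the string into even-index and odd-index halves (inp[0::2], inp[1::2]) and computing the product of the nonzero even digits and the sum of the odd digits directly, replacing the flag/mutable-list bookkeeping.
import Mathlib
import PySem

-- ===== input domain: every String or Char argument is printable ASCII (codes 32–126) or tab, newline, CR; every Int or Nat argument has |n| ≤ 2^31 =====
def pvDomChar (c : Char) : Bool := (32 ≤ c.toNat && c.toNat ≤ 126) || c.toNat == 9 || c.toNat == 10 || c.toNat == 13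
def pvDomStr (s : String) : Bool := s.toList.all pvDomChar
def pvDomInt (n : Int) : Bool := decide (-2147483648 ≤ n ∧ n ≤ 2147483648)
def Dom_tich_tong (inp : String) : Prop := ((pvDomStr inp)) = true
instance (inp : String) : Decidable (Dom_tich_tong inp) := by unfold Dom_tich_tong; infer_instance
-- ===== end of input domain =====

-- B replaces A's index loop with parity tests by even/odd slices and a direct product/sum (objective: simpler).

-- int(c) for a single character c (Pre_ guarantees c is a digit, so the default is never used)
def pvDigit (c : Char) : Int := (PySem.Int.ofChars? [c]).getD 0

-- ===== PORT A =====
-- literal port: the for-loop over range(len(inp)) with inp[i] becomes a foldl over the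
-- (char, index) pairs of the string; the state is (lst[0], lst[1], flag)
def tich_tong (inp : String) : List Int :=
  let cs := inp.toList
  let st := cs.zipIdx.foldl (init := ((1 : Int), (0 : Int), true))
    (fun st ci =>
      if ci.2 % 2 = 0 then
        if ci.1 ≠ '0' then (st.1 * pvDigit ci.1, st.2.1, false) else st
      else
        (st.1, st.2.1 + pvDigit ci.1, st.2.2))
  [if st.2.2 then 0 else st.1, st.2.1]

-- ===== PORT B =====
-- literal port of Source B: the two slices, the two comprehensions, the product loop
def tich_tong_alt (inp : String) : List Int :=
  let cs := inp.toList
  let evens := ((PySem.List.slice? cs (some 0) none 2).getD []).filterMap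
    (fun c => if c ≠ '0' then some (pvDigit c) else none)
  let odds := ((PySem.List.slice? cs (some 1) none 2).getD []).map pvDigit
  [if evens.isEmpty then 0 else evens.foldl (· * ·) 1, odds.sum]

-- ===== PRECONDITION & SPEC =====
-- Pre_ excludes exactly the strings containing a non-digit character: on those A raises
-- ValueError (only the zero digit is skipped, so every non-digit character reaches an int() call).
def Pre_tich_tong (inp : String) : Prop := inp.toList.all PySem.Str.isdigit = true
instance (inp : String) : Decidable (Pre_tich_tong inp) := by unfold Pre_tich_tong; infer_instance
def pvWitness_tich_tong : String := "30157"

def Spec_tich_tong (inp : String) (out : List Int) : Prop := out = tich_tong_alt inp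
instance (inp : String) (out : List Int) : Decidable (Spec_tich_tong inp out) := by unfold Spec_tich_tong; infer_instance

-- ===== CLAIM (what is proved, stated in full; the proofs are below) =====
def Claim_equal_tich_tong : Prop := ∀ (inp : String), Dom_tich_tong inp → Pre_tich_tong inp → Spec_tich_tong inp (tich_tong inp)

-- ===== LEMMAS AND PROOFS =====

-- characters at even positions (0,2,4,…)
def takeEvens {α : Type} : List α → List α
  | [] => []
  | [a] => [a]
  | a :: _ :: t => a :: takeEvens t

-- pure-list form of A's loop body, parametrised by "is the current index even?"
def gAux : Bool → List Char → Int × Int × Bool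
  | _, [] => (1, 0, true)
  | true, c :: t =>
      let r := gAux false t
      if c ≠ '0' then (pvDigit c * r.1, r.2.1, false) else r
  | false, c :: t =>
      let r := gAux true t
      (r.1, pvDigit c + r.2.1, r.2.2)

def evensFiltered (cs : List Char) : List Int :=
  (takeEvens cs).filterMap (fun c => if c ≠ '0' then some (pvDigit c) else none)

theorem core0 {α : Type} : ∀ xs : List α,
    (List.range ((xs.length + 1) / 2)).filterMap (fun k => xs[2 * k]?) = takeEvens xs
  | [] => by simp [takeEvens]
  | [a] => by simp [takeEvens, List.range_succ]
  | a :: b :: t => by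
    have ih := core0 t
    have hlen : ((a :: b :: t).length + 1) / 2 = (t.length + 1) / 2 + 1 := by
      simp [List.length_cons]; omega
    rw [hlen, List.range_succ_eq_map, List.filterMap_cons, List.filterMap_map]
    have : ∀ k ∈ List.range ((t.length + 1) / 2),
        ((fun k => (a :: b :: t)[2 * k]?) ∘ Nat.succ) k = (fun k => t[2 * k]?) k := by
      intro k _
      show (a :: b :: t)[2 * (k + 1)]? = t[2 * k]?
      have h2 : 2 * (k + 1) = 2 * k + 1 + 1 := by omega
      rw [h2, List.getElem?_cons_succ, List.getElem?_cons_succ]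
    rw [List.filterMap_congr this, ih]
    simp [takeEvens]

theorem slice0_eq (xs : List Char) :
    PySem.List.slice? xs (some 0) none 2 = some (takeEvens xs) := by
  rw [← core0 xs]
  simp only [PySem.List.slice?, PySem.List.sliceIndices]
  norm_num
  have hcount : (if 0 < xs.length then (((xs.length : Int) + 2 - 1) / 2).toNat else 0)
      = (xs.length + 1) / 2 := by
    by_cases h : 0 < xs.length
    · rw [if_pos h]
      have h1 : ((xs.length : Int) + 2 - 1) = (((xs.length + 1 : Nat)) : Int) := by push_cast; ring
      rw [h1]; norm_cast
    · rw [if_neg h]; omega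
  rw [hcount]
  apply List.filterMap_congr
  intro k _
  have hk : ((2 : Int) * (k : Int)).toNat = 2 * k := by omega
  rw [hk]

theorem slice1_eq : ∀ xs : List Char,
    PySem.List.slice? xs (some 1) none 2 = some (takeEvens xs.tail)
  | [] => by simp [PySem.List.slice?, PySem.List.sliceIndices, takeEvens]
  | a :: t => by
    rw [List.tail_cons, ← core0 t]
    simp only [PySem.List.slice?, PySem.List.sliceIndices]
    norm_num
    have hcount : (if 0 < t.length then (((t.length : Int) + 2 - 1) / 2).toNat else 0)
        = (t.length + 1) / 2 := by
      by_cases h : 0 < t.length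
      · rw [if_pos h]
        have h1 : ((t.length : Int) + 2 - 1) = (((t.length + 1 : Nat)) : Int) := by push_cast; ring
        rw [h1]; norm_cast
      · rw [if_neg h]; omega
    rw [hcount]
    apply List.filterMap_congr
    intro k _
    have hk : ((1 : Int) + 2 * (k : Int)).toNat = 2 * k + 1 := by omega
    rw [hk, List.getElem?_cons_succ]

theorem gAux_spec : ∀ cs : List Char,
    gAux true cs = ((evensFiltered cs).prod, ((takeEvens cs.tail).map pvDigit).sum,
                    (evensFiltered cs).isEmpty)
    ∧ gAux false cs = ((evensFiltered cs.tail).prod, ((takeEvens cs).map pvDigit).sum,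
                    (evensFiltered cs.tail).isEmpty)
  | [] => by simp [gAux, evensFiltered, takeEvens]
  | c :: t => by
    obtain ⟨ht, hf⟩ := gAux_spec t
    have hA : takeEvens (c :: t) = c :: takeEvens t.tail := by
      match t with
      | [] => simp [takeEvens]
      | b :: t' => simp [takeEvens]
    refine ⟨?_, ?_⟩
    · show gAux true (c :: t) = _
      simp only [gAux, hf]
      by_cases hc : c = '0'
      · subst hc
        simp [evensFiltered, hA, List.tail_cons]
      · have hE : evensFiltered (c :: t) = pvDigit c :: evensFiltered t.tail := by
          simp [evensFiltered, hA, hc]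
        simp [hc, hE, List.tail_cons]
    · show gAux false (c :: t) = _
      simp only [gAux, ht, List.tail_cons]
      simp [hA]

theorem foldl_zipIdx (cs : List Char) : ∀ (n : Nat) (st : Int × Int × Bool),
    (cs.zipIdx n).foldl
      (fun st (ci : Char × Nat) =>
        if ci.2 % 2 = 0 then
          if ci.1 ≠ '0' then (st.1 * pvDigit ci.1, st.2.1, false) else st
        else
          (st.1, st.2.1 + pvDigit ci.1, st.2.2)) st
    = (st.1 * (gAux (n % 2 == 0) cs).1,
       st.2.1 + (gAux (n % 2 == 0) cs).2.1,
       st.2.2 && (gAux (n % 2 == 0) cs).2.2) := by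
  induction cs with
  | nil => intro n st; simp [gAux]
  | cons c t ih =>
    intro n st
    rw [List.zipIdx_cons, List.foldl_cons]
    rw [ih (n + 1)]
    by_cases hn : n % 2 = 0
    · have e1 : (n % 2 == 0) = true := by simp [hn]
      have e2 : ((n + 1) % 2 == 0) = false := by simp only [beq_eq_false_iff_ne, ne_eq]; omega
      rw [e1, e2]
      by_cases hc : c = '0'
      · subst hc; simp [hn, gAux]
      · simp [hn, hc, gAux, mul_assoc]
    · have e1 : (n % 2 == 0) = false := by simp [hn]
      have e2 : ((n + 1) % 2 == 0) = true := by simp only [beq_iff_eq]; omega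
      rw [e1, e2]
      simp [hn, gAux, add_assoc]

-- ===== VERDICT (by name: the statement is the Claim_ definition above) =====
theorem tich_tong_spec : Claim_equal_tich_tong := by
  intro inp _ _
  show tich_tong inp = tich_tong_alt inp
  simp only [tich_tong, tich_tong_alt, slice0_eq, slice1_eq, Option.getD_some]
  rw [foldl_zipIdx inp.toList 0 (1, 0, true)]
  have h0 : ((0 : Nat) % 2 == 0) = true := by decide
  rw [h0]
  obtain ⟨hg, -⟩ := gAux_spec inp.toList
  rw [hg]
  simp only [one_mul, zero_add, Bool.true_and]
  rw [← List.prod_eq_foldl]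
  simp only [evensFiltered]
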